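-- pv_equiv track=rewrite | github.com/libnano/libnano | libnano/util.py | gc_run
-- ===== SOURCE A (Python) =====
-- def gc_run(
--         seq: str,
--         run_length: int,
-- ) -> bool:
--     '''
--     Args:
--         seq: Sequence to operate on
--         run_length: maximum GC run limit
--
--     Returns:
--         ``True`` of seq has a maximum GC run length <= run_length
--
--     '''
--     lrun = 0
--     for b in seq:
--         if b in 'GC':
--             lrun += 1
--             if lrun > run_length:
--                 return False
--         else:
--             lrun = 0
--     return True
-- ===== SOURCE B (Python) =====
-- from itertools import groupby
--
--
-- def gc_run(seq, run_length):
--     for is_gc, grp in groupby(seq, key=lambda b: b in 'GC'):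
--         if is_gc and sum(1 for _ in grp) > run_length:
--             return False
--     return True
-- ===== Notes on version B (the rewrite author's own statement) =====
-- stated objective: idiomatic
-- what changed: Replaced the byte-by-byte running counter with itertools.groupby: the sequence is split into maximal GC/non-GC runs and each GC run's length is compared to the limit.
import Mathlib
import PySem

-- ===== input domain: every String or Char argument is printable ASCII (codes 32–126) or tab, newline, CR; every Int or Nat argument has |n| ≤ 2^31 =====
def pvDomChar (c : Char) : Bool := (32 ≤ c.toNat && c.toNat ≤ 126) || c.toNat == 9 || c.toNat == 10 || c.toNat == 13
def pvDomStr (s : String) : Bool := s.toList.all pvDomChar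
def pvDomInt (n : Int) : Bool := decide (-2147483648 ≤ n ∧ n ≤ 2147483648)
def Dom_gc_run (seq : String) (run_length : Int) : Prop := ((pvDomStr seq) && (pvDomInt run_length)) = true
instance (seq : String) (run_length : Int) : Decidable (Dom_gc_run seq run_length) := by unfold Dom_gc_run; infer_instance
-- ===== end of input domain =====

-- B replaces A's running counter with a groupby-style split into maximal GC runs (idiomatic; same cost).

-- ===== PORT A =====
-- the membership test `b in 'GC'`
def gcIsGC (b : Char) : Bool := b = 'G' || b = 'C'

-- A's loop: state lrun, early return False when lrun exceeds run_length
def gcRunLoop (l : List Char) (lrun : Int) (run_length : Int) : Bool :=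
  match l with
  | [] => true
  | b :: rest =>
      if gcIsGC b then
        if lrun + 1 > run_length then false
        else gcRunLoop rest (lrun + 1) run_length
      else gcRunLoop rest 0 run_length

def gc_run (seq : String) (run_length : Int) : Bool :=
  gcRunLoop seq.toList 0 run_length

-- ===== PORT B =====
-- groupby: consume one maximal same-key group at a time; measure GC groups, skip ahead otherwise
def gcAltLoop (run_length : Int) (l : List Char) : Bool :=
  match l with
  | [] => true
  | b :: rest =>
      if gcIsGC b then
        -- maximal GC group is b together with rest.takeWhile gcIsGC
        if (1 + (rest.takeWhile gcIsGC).length : Int) > run_length then false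
        else gcAltLoop run_length (rest.dropWhile gcIsGC)
      else gcAltLoop run_length rest
termination_by l.length
decreasing_by
  · exact Nat.lt_succ_of_le (List.length_dropWhile_le _ _)
  · simp

def gc_run_alt (seq : String) (run_length : Int) : Bool :=
  gcAltLoop run_length seq.toList

-- ===== PRECONDITION & SPEC =====
def Spec_gc_run (seq : String) (run_length : Int) (out : Bool) : Prop := out = gc_run_alt seq run_length
instance (seq : String) (run_length : Int) (out : Bool) : Decidable (Spec_gc_run seq run_length out) := by unfold Spec_gc_run; infer_instance

-- ===== CLAIM (what is proved, stated in full; the proofs are below) =====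
def Claim_equal_gc_run : Prop := ∀ (seq : String) (run_length : Int), Dom_gc_run seq run_length → Spec_gc_run seq run_length (gc_run seq run_length)

-- ===== LEMMAS AND PROOFS =====

-- A's loop over a block of GC characters: false iff the accumulated count exceeds the limit
theorem gcRunLoop_gc_block (run : List Char) (drop : List Char) (k rl : Int)
    (h : ∀ c ∈ run, gcIsGC c = true) :
    gcRunLoop (run ++ drop) k rl =
      if run ≠ [] ∧ k + run.length > rl then false
      else gcRunLoop drop (k + run.length) rl := by
  induction run generalizing k with
  | nil => simp
  | cons c rs ih =>
      have hc : gcIsGC c = true := h c (by simp)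
      have hrs : ∀ x ∈ rs, gcIsGC x = true := fun x hx => h x (by simp [hx])
      simp only [List.cons_append, gcRunLoop, hc, if_pos]
      rw [ih _ hrs]
      by_cases h1 : k + 1 > rl
      · have : (c :: rs : List Char) ≠ [] ∧ k + (c :: rs).length > rl := by
          constructor
          · simp
          · simp; omega
        simp only [if_pos h1, if_pos this]
      · simp only [if_neg h1]
        by_cases h2 : rs = []
        · subst h2
          simp only [List.length_nil, List.length_cons]
          have : ¬ ((c :: ([] : List Char)) ≠ [] ∧ k + ((1 : Nat) : Int) > rl) := by
            simp; omega
          simp only [if_neg this]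
          norm_num
        · have he : (rs ≠ [] ∧ k + 1 + rs.length > rl) ↔
              ((c :: rs : List Char) ≠ [] ∧ k + (c :: rs).length > rl) := by
            simp [h2]; constructor <;> intro hh <;> omega
          rw [if_congr he rfl rfl]
          split
          · rfl
          · congr 1
            simp only [List.length_cons]
            push_cast
            omega
  
-- head of dropWhile does not satisfy the predicate
theorem dropWhile_head_false {p : Char → Bool} {l : List Char} {c : Char} {cs : List Char}
    (h : l.dropWhile p = c :: cs) : p c = false := by
  induction l with
  | nil => simp [List.dropWhile] at h
  | cons a as ih =>
      by_cases ha : p a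
      · exact ih (by simpa [List.dropWhile, ha] using h)
      · simp only [List.dropWhile, ha] at h
        cases h
        simpa using ha

-- the main equivalence, by strong induction on the length of the list
theorem gcLoop_eq_alt (rl : Int) : ∀ (n : ℕ) (l : List Char), l.length ≤ n →
    gcRunLoop l 0 rl = gcAltLoop rl l := by
  intro n
  induction n with
  | zero =>
      intro l hl
      have : l = [] := List.eq_nil_of_length_eq_zero (Nat.le_zero.mp hl)
      subst this
      simp [gcRunLoop, gcAltLoop]
  | succ n ih =>
      intro l hl
      match l with
      | [] => simp [gcRunLoop, gcAltLoop]
      | b :: rest =>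
          by_cases hb : gcIsGC b
          · have hsplit : rest = rest.takeWhile gcIsGC ++ rest.dropWhile gcIsGC :=
              (List.takeWhile_append_dropWhile).symm
            have htw : ∀ c ∈ rest.takeWhile gcIsGC, gcIsGC c = true :=
              fun c hc => List.mem_takeWhile_imp hc
            simp only [gcRunLoop, gcAltLoop, hb, if_pos]
            by_cases h1 : (0 : Int) + 1 > rl
            · have h2 : (1 + (rest.takeWhile gcIsGC).length : Int) > rl := by
                have := (rest.takeWhile gcIsGC).length
                omega
              simp [h2]
              omega
            · simp only [if_neg h1]
              conv_lhs => rw [hsplit]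
              rw [gcRunLoop_gc_block _ _ _ _ htw]
              have hcombine : ((rest.takeWhile gcIsGC) ≠ [] ∧
                  (0 : Int) + 1 + (rest.takeWhile gcIsGC).length > rl) ↔
                  (1 + ((rest.takeWhile gcIsGC).length : Int) > rl) := by
                constructor
                · intro ⟨_, hh⟩; omega
                · intro hh
                  constructor
                  · intro hnil
                    rw [hnil] at hh
                    simp at hh
                    omega
                  · omega
              rw [if_congr hcombine rfl rfl]
              split
              · rfl
              · -- remaining: gcRunLoop (dropWhile) k = gcAltLoop (dropWhile)
                cases hdw : rest.dropWhile gcIsGC with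
                | nil => simp [gcRunLoop, gcAltLoop]
                | cons d ds =>
                    have hd : gcIsGC d = false := dropWhile_head_false hdw
                    have hlen : ds.length ≤ n := by
                      have h1 : (rest.dropWhile gcIsGC).length ≤ rest.length :=
                        List.length_dropWhile_le _ _
                      rw [hdw] at h1
                      simp at h1 hl
                      omega
                    simp only [gcRunLoop, gcAltLoop, hd]
                    simp only [Bool.false_eq_true, reduceIte]
                    exact ih ds hlen
          · simp only [gcRunLoop, gcAltLoop, hb]
            simp only [Bool.false_eq_true, reduceIte]
            exact ih rest (by simp at hl ⊢; omega)

-- ===== VERDICT (by name: the statement is the Claim_ definition above) =====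
theorem gc_run_spec : Claim_equal_gc_run := by
  intro seq rl _
  unfold Spec_gc_run gc_run gc_run_alt
  exact gcLoop_eq_alt rl seq.toList.length seq.toList le_rfl
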